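-- pv_equiv track=rewrite | github.com/IanPoe03/hex-base3 | app.py | build_direction_lines
-- ===== SOURCE A (Python) =====
-- from typing import Dict, List, Tuple, Optional
--
-- def build_direction_lines(cells: List[Tuple[int, int]], directions) -> List[List[List[Tuple[int, int]]]]:
--     cell_set = set(cells)
--     all_dir_lines = []
--
--     for dq, dr in directions:
--         lines = []
--         for q, r in cells:
--             back = (q - dq, r - dr)
--             if back not in cell_set:
--                 line = []
--                 cq, cr = q, r
--                 while (cq, cr) in cell_set:
--                     line.append((cq, cr))
--                     cq += dq
--                     cr += dr
--                 lines.append(line)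
--         all_dir_lines.append(lines)
--
--     return all_dir_lines
-- ===== SOURCE B (Python) =====
-- def build_direction_lines(cells, directions):
--     cell_set = set(cells)
--     all_dir_lines = []
--     for dq, dr in directions:
--         if dq == 0 and dr == 0:
--             # zero direction: every cell is its own predecessor, so no line starts
--             all_dir_lines.append([])
--             continue
--         # dynamic programming: visit cells from the far end of the direction backwards,
--         # so the maximal line through c is c followed by the already-computed line at c + d
--         if dq != 0:
--             order = sorted(cell_set, key=lambda c: c[0] * (1 if dq > 0 else -1), reverse=True)
--         else:
--             order = sorted(cell_set, key=lambda c: c[1] * (1 if dr > 0 else -1), reverse=True)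
--         line = {}
--         for q, r in order:
--             line[(q, r)] = [(q, r)] + line.get((q + dq, r + dr), [])
--         # a cell starts a line iff it is nobody's successor
--         succs = {(q + dq, r + dr) for (q, r) in cell_set}
--         all_dir_lines.append([line[c] for c in cells if c not in succs])
--     return all_dir_lines
-- ===== Notes on version B (the rewrite author's own statement) =====
-- stated objective: alternative
-- what changed: B replaces A's start-detection-plus-forward-walk (which re-walks every line from each start occurrence) by a per-direction dynamic program: cells are sorted from the far end of the direction backwards and each cell's maximal line is computed once as the cell prepended to the memoized line of its successor; starts are the complement of the successor set and lines are emitted by lookup in input order.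
import Mathlib
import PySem

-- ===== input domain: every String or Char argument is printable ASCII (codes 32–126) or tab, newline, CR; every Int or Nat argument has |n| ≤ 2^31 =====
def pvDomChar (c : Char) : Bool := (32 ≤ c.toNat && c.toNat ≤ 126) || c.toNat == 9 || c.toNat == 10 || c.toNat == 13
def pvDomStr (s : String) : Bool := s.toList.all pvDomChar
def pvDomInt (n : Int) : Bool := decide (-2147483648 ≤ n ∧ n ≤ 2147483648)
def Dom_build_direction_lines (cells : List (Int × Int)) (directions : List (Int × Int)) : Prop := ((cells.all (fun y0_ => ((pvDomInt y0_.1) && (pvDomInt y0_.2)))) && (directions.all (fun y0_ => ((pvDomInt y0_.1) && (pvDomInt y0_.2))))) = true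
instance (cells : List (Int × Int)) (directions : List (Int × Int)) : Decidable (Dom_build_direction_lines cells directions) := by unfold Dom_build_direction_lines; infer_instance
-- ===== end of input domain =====

-- B replaces A's per-start forward walk by a per-direction dynamic program over the cells
-- sorted from the far end of the direction backwards (each maximal line computed once,
-- starts found as the complement of the successor set); alternative decomposition.


-- ===== PORT A =====
-- the 'while (cq, cr) in cell_set' walk, with fuel; consecutive visited cells differ by (dq, dr),
-- so whenever the Python loop terminates it runs at most |cell_set| iterations: fuel |cell_set| + 1 is exact
-- (for (dq, dr) = (0, 0) the walk is never entered, since the start guard 'back not in cell_set' fails).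
def pvWalk (cellSet : List (Int × Int)) (dq dr : Int) : Nat → Int → Int → List (Int × Int)
  | 0, _, _ => []
  | f + 1, cq, cr =>
      if cellSet.contains (cq, cr) then (cq, cr) :: pvWalk cellSet dq dr f (cq + dq) (cr + dr)
      else []

def build_direction_lines (cells : List (Int × Int)) (directions : List (Int × Int)) : List (List (List (Int × Int))) :=
  let cellSet : PySem.Set (Int × Int) := PySem.Set.ofList cells
  directions.foldl (fun allDirLines d =>
    allDirLines ++ [cells.foldl (fun lines c =>
      if !cellSet.contains (c.1 - d.1, c.2 - d.2) then
        lines ++ [pvWalk cellSet d.1 d.2 (cellSet.length + 1) c.1 c.2]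
      else lines) []]) []

-- ===== PORT B =====
def build_direction_lines_alt (cells : List (Int × Int)) (directions : List (Int × Int)) : List (List (List (Int × Int))) :=
  let cellSet : PySem.Set (Int × Int) := PySem.Set.ofList cells
  directions.foldl (fun out d =>
    if d.1 == 0 && d.2 == 0 then out ++ [[]]
    else
      -- sorted(cell_set, key=…, reverse=True): far end of the direction first
      let order : List (Int × Int) :=
        if d.1 ≠ 0 then
          PySem.List.sorted cellSet (fun c => c.1 * (if d.1 > 0 then 1 else -1)) true
        else
          PySem.List.sorted cellSet (fun c => c.2 * (if d.2 > 0 then 1 else -1)) true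
      -- line[(q, r)] = [(q, r)] + line.get((q + dq, r + dr), [])
      let line : PySem.Dict (Int × Int) (List (Int × Int)) :=
        order.foldl (fun m c => m.insert c (c :: m.getD (c.1 + d.1, c.2 + d.2) [])) PySem.Dict.empty
      -- succs = {(q + dq, r + dr) for (q, r) in cell_set}
      let succs : PySem.Set (Int × Int) :=
        PySem.Set.ofList (cellSet.map (fun c => (c.1 + d.1, c.2 + d.2)))
      -- [line[c] for c in cells if c not in succs]  (line[c] exists for every c in cells)
      out ++ [cells.filterMap (fun c => if succs.contains c then none else line.get? c)]) []

-- ===== PRECONDITION & SPEC =====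
def Spec_build_direction_lines (cells : List (Int × Int)) (directions : List (Int × Int)) (out : List (List (List (Int × Int)))) : Prop := out = build_direction_lines_alt cells directions
instance (cells : List (Int × Int)) (directions : List (Int × Int)) (out : List (List (List (Int × Int)))) : Decidable (Spec_build_direction_lines cells directions out) := by unfold Spec_build_direction_lines; infer_instance

-- ===== CLAIM (what is proved, stated in full; the proofs are below) =====
def Claim_equal_build_direction_lines : Prop := ∀ (cells : List (Int × Int)) (directions : List (Int × Int)), Dom_build_direction_lines cells directions → Spec_build_direction_lines cells directions (build_direction_lines cells directions)

-- ===== LEMMAS AND PROOFS =====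

-- every cell the walk visits is in the set
theorem pv_walk_mem (S : List (Int × Int)) (dq dr : Int) :
    ∀ (f : Nat) (cq cr : Int) (y : Int × Int), y ∈ pvWalk S dq dr f cq cr → y ∈ S := by
  intro f
  induction f with
  | zero => intro cq cr y hy; simp [pvWalk] at hy
  | succ f ih =>
    intro cq cr y hy
    by_cases hc : S.contains (cq, cr) = true
    · rw [pvWalk, if_pos hc] at hy
      rcases List.mem_cons.mp hy with h | h
      · subst h; exact List.contains_iff_mem.mp hc
      · exact ih _ _ _ h
    · rw [pvWalk, if_neg hc] at hy; simp at hy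

-- every visited cell is the start shifted by a nonnegative multiple of the direction
theorem pv_walk_ex (S : List (Int × Int)) (dq dr : Int) :
    ∀ (f : Nat) (cq cr : Int) (y : Int × Int), y ∈ pvWalk S dq dr f cq cr →
      ∃ i : Nat, y = (cq + i * dq, cr + i * dr) := by
  intro f
  induction f with
  | zero => intro cq cr y hy; simp [pvWalk] at hy
  | succ f ih =>
    intro cq cr y hy
    by_cases hc : S.contains (cq, cr) = true
    · rw [pvWalk, if_pos hc] at hy
      rcases List.mem_cons.mp hy with h | h
      · exact ⟨0, by simp [h]⟩
      · obtain ⟨i, hi⟩ := ih _ _ _ h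
        refine ⟨i + 1, ?_⟩
        rw [hi, Prod.mk.injEq]
        constructor <;> (push_cast; ring)
    · rw [pvWalk, if_neg hc] at hy; simp at hy

-- a nonzero direction never returns to an earlier cell
theorem pv_walk_not_self (S : List (Int × Int)) (dq dr : Int) (hd : ¬(dq = 0 ∧ dr = 0))
    (f : Nat) (cq cr : Int) (y : Int × Int)
    (hy : y ∈ pvWalk S dq dr f (cq + dq) (cr + dr)) : y ≠ (cq, cr) := by
  obtain ⟨i, hi⟩ := pv_walk_ex S dq dr f (cq + dq) (cr + dr) y hy
  intro hcontra
  rw [hcontra] at hi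
  have h1 : (1 + (i : Int)) * dq = 0 := by
    have := congrArg Prod.fst hi; simp at this; linarith [this]
  have h2 : (1 + (i : Int)) * dr = 0 := by
    have := congrArg Prod.snd hi; simp at this; linarith [this]
  have hpos : (0 : Int) < 1 + (i : Int) := by positivity
  rcases mul_eq_zero.mp h1 with h | h
  · omega
  · rcases mul_eq_zero.mp h2 with h' | h'
    · omega
    · exact hd ⟨h, h'⟩

theorem pv_walk_nodup (S : List (Int × Int)) (dq dr : Int) (hd : ¬(dq = 0 ∧ dr = 0)) :
    ∀ (f : Nat) (cq cr : Int), (pvWalk S dq dr f cq cr).Nodup := by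
  intro f
  induction f with
  | zero => intro cq cr; simp [pvWalk]
  | succ f ih =>
    intro cq cr
    by_cases hc : S.contains (cq, cr) = true
    · rw [pvWalk, if_pos hc]
      exact List.Nodup.cons
        (fun h => pv_walk_not_self S dq dr hd f cq cr _ h rfl) (ih _ _)
    · rw [pvWalk, if_neg hc]; exact List.nodup_nil

-- a nodup list inside another list is no longer than it
theorem pv_nodup_length_le (l l' : List (Int × Int)) (h : l.Nodup) (hs : ∀ y ∈ l, y ∈ l') :
    l.length ≤ l'.length := by
  have h1 : l.toFinset.card = l.length := List.toFinset_card_of_nodup h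
  have h2 : l.toFinset ⊆ l'.toFinset := by
    intro x hx; simp only [List.mem_toFinset] at *; exact hs x hx
  calc l.length = l.toFinset.card := h1.symm
    _ ≤ l'.toFinset.card := Finset.card_le_card h2
    _ ≤ l'.length := l'.toFinset_card_le

-- fuel past the walk's end does not change it
theorem pv_walk_fuel (S : List (Int × Int)) (dq dr : Int) :
    ∀ (f : Nat) (cq cr : Int), (pvWalk S dq dr f cq cr).length < f →
      pvWalk S dq dr f cq cr = pvWalk S dq dr (f + 1) cq cr := by
  intro f
  induction f with
  | zero => intro cq cr h; omega
  | succ f ih =>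
    intro cq cr h
    by_cases hc : S.contains (cq, cr) = true
    · rw [pvWalk, if_pos hc] at h ⊢
      rw [show f + 1 + 1 = (f + 1) + 1 from rfl, pvWalk, if_pos hc]
      simp only [List.length_cons] at h
      rw [ih (cq + dq) (cr + dr) (by omega)]
    · rw [pvWalk, if_neg hc, show f + 1 + 1 = (f + 1) + 1 from rfl, pvWalk, if_neg hc]

-- one Python-loop step of the walk, at the exact fuel |S| + 1
theorem pv_walk_unfold (S : List (Int × Int)) (dq dr : Int) (hd : ¬(dq = 0 ∧ dr = 0))
    (hnd : S.Nodup) (cq cr : Int) (hx : (cq, cr) ∈ S) :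
    pvWalk S dq dr (S.length + 1) cq cr =
      (cq, cr) :: (if S.contains (cq + dq, cr + dr) = true
        then pvWalk S dq dr (S.length + 1) (cq + dq) (cr + dr) else []) := by
  have hc : S.contains (cq, cr) = true := List.contains_iff_mem.mpr hx
  rw [pvWalk, if_pos hc]
  by_cases hnext : S.contains (cq + dq, cr + dr) = true
  · rw [if_pos hnext]
    congr 1
    apply pv_walk_fuel
    have hsub : ∀ y ∈ pvWalk S dq dr S.length (cq + dq) (cr + dr), y ∈ S.erase (cq, cr) := by
      intro y hy
      rw [List.Nodup.mem_erase_iff hnd]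
      exact ⟨pv_walk_not_self S dq dr hd _ cq cr y hy, pv_walk_mem S dq dr _ _ _ y hy⟩
    have hlen := pv_nodup_length_le _ _ (pv_walk_nodup S dq dr hd S.length (cq + dq) (cr + dr)) hsub
    rw [List.length_erase_of_mem hx] at hlen
    have hS : 1 ≤ S.length := List.length_pos_of_mem hx
    omega
  · rw [if_neg hnext]
    have hS : 1 ≤ S.length := List.length_pos_of_mem hx
    obtain ⟨m, hm⟩ : ∃ m, S.length = m + 1 := ⟨S.length - 1, by omega⟩
    rw [hm, pvWalk, if_neg hnext]

-- invariant of B's memoizing loop: after processing the sorted cells, the dict maps every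
-- cell of the set to the maximal line A's walk would produce from it
theorem pv_dp (S : List (Int × Int)) (dq dr : Int) (key : (Int × Int) → Int)
    (hd : ¬(dq = 0 ∧ dr = 0)) (hnd : S.Nodup)
    (hkey : ∀ c : Int × Int, key c < key (c.1 + dq, c.2 + dr)) :
    ∀ (rest : List (Int × Int)) (m : PySem.Dict (Int × Int) (List (Int × Int))),
      rest.Nodup → (∀ x ∈ rest, x ∈ S) →
      rest.Pairwise (fun a b => key b ≤ key a) →
      (∀ x : Int × Int, m.get? x =
        if x ∈ S ∧ x ∉ rest then some (pvWalk S dq dr (S.length + 1) x.1 x.2) else none) →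
      ∀ x : Int × Int,
        (rest.foldl (fun m c => m.insert c (c :: m.getD (c.1 + dq, c.2 + dr) [])) m).get? x
          = if x ∈ S then some (pvWalk S dq dr (S.length + 1) x.1 x.2) else none := by
  intro rest
  induction rest with
  | nil =>
    intro m _ _ _ hinv x
    have := hinv x
    simpa using this
  | cons c rest ih =>
    intro m hndr hsub hpair hinv x
    simp only [List.foldl_cons]
    have hcS : c ∈ S := hsub c List.mem_cons_self
    have hcnotrest : c ∉ rest := (List.nodup_cons.mp hndr).1
    -- the inserted value is exactly A's walk from c
    have hval : (c :: m.getD (c.1 + dq, c.2 + dr) []) = pvWalk S dq dr (S.length + 1) c.1 c.2 := by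
      rw [pv_walk_unfold S dq dr hd hnd c.1 c.2 hcS]
      by_cases hnext : S.contains (c.1 + dq, c.2 + dr) = true
      · rw [if_pos hnext]
        have hmem : (c.1 + dq, c.2 + dr) ∈ S := List.contains_iff_mem.mp hnext
        have hne : (c.1 + dq, c.2 + dr) ∉ (c :: rest) := by
          intro hmem'
          rcases List.mem_cons.mp hmem' with h | h
          · have h2 := hkey c; rw [h] at h2; omega
          · have hle := (List.pairwise_cons.mp hpair).1 _ h
            have := hkey c
            omega
        have := hinv (c.1 + dq, c.2 + dr)
        rw [if_pos ⟨hmem, hne⟩] at this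
        rw [PySem.Dict.getD_eq_get?_getD, this]
        rfl
      · rw [if_neg hnext]
        have hmem : (c.1 + dq, c.2 + dr) ∉ S := fun h => hnext (List.contains_iff_mem.mpr h)
        have := hinv (c.1 + dq, c.2 + dr)
        rw [if_neg (fun h => hmem h.1)] at this
        rw [PySem.Dict.getD_eq_get?_getD, this]
        rfl
    apply ih
    · exact (List.nodup_cons.mp hndr).2
    · exact fun y hy => hsub y (List.mem_cons_of_mem c hy)
    · exact (List.pairwise_cons.mp hpair).2
    · intro y
      rw [PySem.Dict.get?_insert]
      by_cases hyc : y = c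
      · subst hyc
        rw [if_pos rfl, if_pos ⟨hcS, hcnotrest⟩, hval]
      · rw [if_neg hyc, hinv y]
        have : (y ∈ S ∧ y ∉ c :: rest) ↔ (y ∈ S ∧ y ∉ rest) := by
          simp [List.mem_cons, hyc]
        by_cases hy : y ∈ S ∧ y ∉ rest
        · rw [if_pos (this.mpr hy), if_pos hy]
        · rw [if_neg (fun h => hy (this.mp h)), if_neg hy]

-- membership in the successor set is membership of the backward neighbour in the cell set
theorem pv_succs_mem (S : List (Int × Int)) (dq dr : Int) (c : Int × Int) :
    (c ∈ PySem.Set.ofList (S.map (fun x => (x.1 + dq, x.2 + dr)))) ↔ (c.1 - dq, c.2 - dr) ∈ S := by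
  rw [PySem.Set.mem_ofList, List.mem_map]
  constructor
  · rintro ⟨x, hx, rfl⟩
    simpa using hx
  · intro h
    exact ⟨(c.1 - dq, c.2 - dr), h, by simp⟩

-- [f(x) if p(x)] as a filter-then-map
theorem pv_filterMap_if (l : List (Int × Int)) (p : (Int × Int) → Bool)
    (w : (Int × Int) → List (Int × Int)) :
    l.filterMap (fun c => if p c then some (w c) else none) = (l.filter p).map w := by
  induction l with
  | nil => simp
  | cons x xs ih => by_cases hx : p x = true <;> simp [hx, ih]

-- B's memoizing loop over the sorted set, resolved: the dict maps each cell to A's walk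
theorem pv_inner_nonzero (cells : List (Int × Int)) (dq dr : Int) (key : (Int × Int) → Int)
    (hd : ¬(dq = 0 ∧ dr = 0)) (hkey : ∀ c : Int × Int, key c < key (c.1 + dq, c.2 + dr)) :
    ∀ x : Int × Int,
      ((PySem.List.sorted (PySem.Set.ofList cells) key true).foldl
          (fun m c => m.insert c (c :: m.getD (c.1 + dq, c.2 + dr) [])) PySem.Dict.empty).get? x
        = if x ∈ PySem.Set.ofList cells
          then some (pvWalk (PySem.Set.ofList cells) dq dr
                  ((PySem.Set.ofList cells : List (Int × Int)).length + 1) x.1 x.2)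
          else none := by
  apply pv_dp (PySem.Set.ofList cells) dq dr key hd (PySem.Set.nodup_ofList cells) hkey
  · exact (PySem.List.sorted_perm _ _ _).nodup_iff.mpr (PySem.Set.nodup_ofList cells)
  · exact fun x hx => (PySem.List.mem_sorted _ _ _ x).mp hx
  · exact PySem.List.sorted_pairwise_rev _ _
  · intro x
    rw [PySem.Dict.get?_empty, if_neg]
    rintro ⟨hxS, hxs⟩
    exact hxs ((PySem.List.mem_sorted _ _ _ x).mpr hxS)

-- membership in the successor set, as the Boolean test the ports use
theorem pv_succs_contains (S : List (Int × Int)) (dq dr : Int) (c : Int × Int) :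
    PySem.Set.contains (PySem.Set.ofList (S.map (fun x => (x.1 + dq, x.2 + dr)))) c
      = PySem.Set.contains S (c.1 - dq, c.2 - dr) := by
  simp only [PySem.Set.contains]
  rw [Bool.eq_iff_iff, List.contains_iff_mem, List.contains_iff_mem]
  exact pv_succs_mem S dq dr c

-- a loop appending one element per iteration, branching on the element
theorem pv_foldl_branch {β : Type} (l : List (Int × Int)) (p : (Int × Int) → Bool)
    (f g : (Int × Int) → β) (acc : List β) :
    l.foldl (fun out d => if p d then out ++ [f d] else out ++ [g d]) acc
      = acc ++ l.map (fun d => if p d then f d else g d) := by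
  induction l generalizing acc with
  | nil => simp
  | cons x xs ih => by_cases hx : p x <;> simp [hx, ih]

-- ===== VERDICT (by name: the statement is the Claim_ definition above) =====
theorem build_direction_lines_spec : Claim_equal_build_direction_lines := by
  intro cells directions _
  unfold Spec_build_direction_lines build_direction_lines build_direction_lines_alt
  simp only [PySem.List.foldl_append_singleton_eq_map, pv_foldl_branch, List.nil_append]
  apply List.map_congr_left
  intro d _
  by_cases hzero : (d.1 == 0 && d.2 == 0) = true
  · -- zero direction: A appends no line (every cell has itself as its backward neighbour)
    rw [if_pos hzero]
    obtain ⟨hq, hr⟩ : d.1 = 0 ∧ d.2 = 0 := by simpa using hzero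
    rw [PySem.List.foldl_append_if, List.nil_append]
    have hfil : cells.filter
        (fun c => !PySem.Set.contains (PySem.Set.ofList cells) (c.1 - d.1, c.2 - d.2)) = [] := by
      apply List.filter_eq_nil_iff.mpr
      intro c hc
      have hcc : (c.1, c.2) ∈ cells := by simpa using hc
      simp [hq, hr, PySem.Set.contains, PySem.Set.mem_ofList, hcc]
    rw [hfil, List.map_nil]
  · -- nonzero direction
    rw [if_neg hzero]
    have hd' : ¬(d.1 = 0 ∧ d.2 = 0) := by simpa using hzero
    rw [PySem.List.foldl_append_if, List.nil_append]
    -- resolve B's memo dict, for either sort key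
    have hline : ∀ x : Int × Int,
        ((if d.1 ≠ 0 then
            PySem.List.sorted (PySem.Set.ofList cells) (fun c => c.1 * (if d.1 > 0 then 1 else -1)) true
          else
            PySem.List.sorted (PySem.Set.ofList cells) (fun c => c.2 * (if d.2 > 0 then 1 else -1)) true).foldl
            (fun m c => m.insert c (c :: m.getD (c.1 + d.1, c.2 + d.2) [])) PySem.Dict.empty).get? x
          = if x ∈ PySem.Set.ofList cells
            then some (pvWalk (PySem.Set.ofList cells) d.1 d.2
                    ((PySem.Set.ofList cells : List (Int × Int)).length + 1) x.1 x.2)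
            else none := by
      by_cases hq : d.1 ≠ 0
      · rw [if_pos hq]
        apply pv_inner_nonzero cells d.1 d.2 _ hd'
        intro c
        by_cases hp : d.1 > 0
        · simp only [hp, if_pos, mul_one]; omega
        · simp only [hp, if_false, mul_neg_one]; omega
      · rw [if_neg hq]
        have hr : d.2 ≠ 0 := fun h => hd' ⟨by omega, h⟩
        apply pv_inner_nonzero cells d.1 d.2 _ hd'
        intro c
        by_cases hp : d.2 > 0
        · simp only [hp, if_pos, mul_one]; omega
        · simp only [hp, if_false, mul_neg_one]; omega
    rw [List.filterMap_congr (g := fun c =>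
        if !PySem.Set.contains (PySem.Set.ofList cells) (c.1 - d.1, c.2 - d.2)
        then some (pvWalk (PySem.Set.ofList cells) d.1 d.2
                ((PySem.Set.ofList cells : List (Int × Int)).length + 1) c.1 c.2)
        else none) ?_]
    · rw [pv_filterMap_if]
    · intro c hc
      rw [pv_succs_contains, hline c,
        if_pos ((PySem.Set.mem_ofList cells c).mpr hc)]
      cases hB : PySem.Set.contains (PySem.Set.ofList cells) (c.1 - d.1, c.2 - d.2) <;>
        simp only [hB, Bool.not_false, Bool.not_true, if_true, if_false, Bool.false_eq_true]
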